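-- pv_equiv track=rewrite | github.com/OlexaNdrus/Codewars | dashatizer.py | dashatize
-- ===== SOURCE A (Python) =====
-- def dashatize(num):
--     if num==None:
--         return 'None'
--     elif num==0:
--         return '0'
--     num=str(abs(num))
--     if len(num)>1:
--         dash=[num[0]]
--         if int(num[0])%2!=0:
--             dash.append('-')
--         for i in num[1:-1]:
--             if int(i)%2!=0 and int(i):
--                 if dash[-1]!='-':
--                     dash.append('-')
--                 dash.append(i)
--                 dash.append('-')
--             else:
--                 dash.append(i)
--         if int(num[-1])%2!=0 and dash[-1]!='-' and int(num[-1]):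
--             dash.append('-')
--         dash.append(num[-1])
--     else:
--         return num
--     return ''.join(dash)
-- ===== SOURCE B (Python) =====
-- def dashatize(num):
--     if num is None:
--         return 'None'
--     s = str(abs(num))
--     return s[0] + ''.join(('-' if int(a) % 2 or int(b) % 2 else '') + b
--                           for a, b in zip(s, s[1:]))
-- ===== Notes on version B (the rewrite author's own statement) =====
-- stated objective: idiomatic
-- what changed: A's stateful lookbehind loop (append dashes depending on the last emitted list item) is replaced by a local pairwise rule: iterate over adjacent digit pairs of str(abs(num)) and put a dash between two digits iff either is odd, as a zip/join one-liner.
import Mathlib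
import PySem

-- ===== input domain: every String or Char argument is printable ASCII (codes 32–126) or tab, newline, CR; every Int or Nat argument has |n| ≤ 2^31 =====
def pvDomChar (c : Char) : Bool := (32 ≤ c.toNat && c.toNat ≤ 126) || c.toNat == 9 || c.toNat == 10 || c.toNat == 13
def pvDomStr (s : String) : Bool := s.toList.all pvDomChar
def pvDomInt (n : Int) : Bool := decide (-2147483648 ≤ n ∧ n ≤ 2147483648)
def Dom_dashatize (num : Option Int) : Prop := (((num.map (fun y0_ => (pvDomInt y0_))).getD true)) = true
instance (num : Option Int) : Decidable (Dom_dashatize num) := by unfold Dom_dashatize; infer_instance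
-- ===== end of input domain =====

-- B replaces A's stateful lookbehind loop (append '-' depending on the last emitted item) by a
-- local pairwise rule: a dash goes between two adjacent digits iff either is odd (idiomatic zip one-liner).

-- int(c) for a one-character string c; the digit strings both programs index are always
-- decimal digits, so ofStr? is always `some` and the getD default is never used.
def pvDigitVal (c : Char) : Int := (PySem.Int.ofStr? (String.ofList [c])).getD 0
-- int(c) % 2 != 0
def pvOdd (c : Char) : Bool := PySem.Int.mod (pvDigitVal c) 2 != 0
-- truthiness of int(c)
def pvNz (c : Char) : Bool := pvDigitVal c != 0

-- ===== PORT A =====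
def dashatize (num : Option Int) : String :=
  match num with
  | none => "None"
  | some v =>
    if v = 0 then "0"
    else
      let s := (PySem.Int.toStr ((v.natAbs : Int))).toList   -- num = str(abs(num))
      if s.length > 1 then
        let dash0 : List Char :=
          if pvOdd (PySem.List.pyGetD s 0 ' ') then [PySem.List.pyGetD s 0 ' ', '-']
          else [PySem.List.pyGetD s 0 ' ']
        -- for i in num[1:-1]:   (dash is always nonempty, so dash[-1] is pyGetD with unused default)
        let dash1 := (PySem.List.slice s (some 1) (some (-1))).foldl
          (fun dash i =>
            if pvOdd i && pvNz i then
              if PySem.List.pyGetD dash (-1) ' ' != '-' then dash ++ ['-', i, '-']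
              else dash ++ [i, '-']
            else dash ++ [i]) dash0
        let last := PySem.List.pyGetD s (-1) ' '
        let dash2 :=
          if pvOdd last && (PySem.List.pyGetD dash1 (-1) ' ' != '-') && pvNz last then
            dash1 ++ ['-', last]
          else dash1 ++ [last]
        String.ofList dash2
      else String.ofList s

-- ===== PORT B =====
def dashatize_alt (num : Option Int) : String :=
  match num with
  | none => "None"
  | some v =>
    let s := (PySem.Int.toStr ((v.natAbs : Int))).toList      -- s = str(abs(num))
    let t := PySem.List.slice s (some 1) none                  -- s[1:]
    let body := (s.zip t).flatMap
      (fun p => (if pvOdd p.1 || pvOdd p.2 then ['-'] else []) ++ [p.2])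
    match s with
    | [] => ""          -- unreachable: str(abs(v)) is never empty, s[0] never raises
    | c0 :: _ => String.ofList (c0 :: body)                    -- s[0] + ''.join(...)

-- ===== PRECONDITION & SPEC =====
def Spec_dashatize (num : Option Int) (out : String) : Prop := out = dashatize_alt num
instance (num : Option Int) (out : String) : Decidable (Spec_dashatize num out) := by unfold Spec_dashatize; infer_instance

-- ===== CLAIM (what is proved, stated in full; the proofs are below) =====
def Claim_equal_dashatize : Prop := ∀ (num : Option Int), Dom_dashatize num → Spec_dashatize num (dashatize num)

-- ===== LEMMAS AND PROOFS =====

def pvDashIf (b : Bool) : List Char := if b then ['-'] else []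

-- the dash pattern B's pairwise rule produces after the head character
def pvPflat (f : Char → Bool) : Char → List Char → List Char
  | _, [] => []
  | a, b :: t => (if f a || f b then ['-'] else []) ++ b :: pvPflat f b t

-- A's loop body with the (redundant) truthiness conjunct already collapsed
def pvStep (f : Char → Bool) (dash : List Char) (i : Char) : List Char :=
  if f i then
    if PySem.List.pyGetD dash (-1) ' ' != '-' then dash ++ ['-', i, '-'] else dash ++ [i, '-']
  else dash ++ [i]

lemma pvOdd_nz (c : Char) (h : pvOdd c = true) : pvNz c = true := by
  unfold pvOdd pvNz at *
  by_cases hv : pvDigitVal c = 0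
  · rw [hv] at h; exact absurd h (by decide)
  · simp [hv]

lemma pvCollapse2 (c : Char) : (pvOdd c && pvNz c) = pvOdd c := by
  cases h : pvOdd c
  · simp
  · simp [pvOdd_nz c h]

lemma pvCollapse (c : Char) (x : Bool) : (pvOdd c && x && pvNz c) = (pvOdd c && x) := by
  cases h : pvOdd c
  · simp
  · cases x <;> simp [pvOdd_nz c h]

lemma pvZipFlat (f : Char → Bool) :
    ∀ (l : List Char) (a : Char),
      ((a :: l).zip l).flatMap (fun p => (if f p.1 || f p.2 then ['-'] else []) ++ [p.2])
        = pvPflat f a l := by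
  intro l
  induction l with
  | nil => intro a; rfl
  | cons b t ih =>
    intro a
    simp only [List.zip_cons_cons, List.flatMap_cons, ih b, pvPflat]
    simp

lemma pvPflat_shape (f : Char → Bool) :
    ∀ (m : List Char) (x : Char), ∃ pre, x :: pvPflat f x m = pre ++ [m.getLastD x] := by
  intro m
  induction m with
  | nil => exact fun x => ⟨[], rfl⟩
  | cons b t ih =>
    intro x
    obtain ⟨pre, hp⟩ := ih b
    refine ⟨x :: ((if f x || f b then ['-'] else []) ++ pre), ?_⟩
    simp only [pvPflat, List.getLastD_cons]
    rw [show (x :: ((if f x || f b then ['-'] else []) ++ pre)) ++ [t.getLastD b]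
        = x :: ((if f x || f b then ['-'] else []) ++ (pre ++ [t.getLastD b])) by simp]
    rw [← hp]

lemma pvPflat_append (f : Char → Bool) :
    ∀ (m : List Char) (a L : Char),
      pvPflat f a (m ++ [L])
        = pvPflat f a m ++ (if f (m.getLastD a) || f L then ['-'] else []) ++ [L] := by
  intro m
  induction m with
  | nil => intro a L; simp [pvPflat]
  | cons b t ih =>
    intro a L
    simp only [List.cons_append, pvPflat, ih b L, List.getLastD_cons]
    simp

lemma pvGetDash (pre : List Char) (a : Char) (b : Bool) :
    PySem.List.pyGetD (pre ++ [a] ++ pvDashIf b) (-1) ' ' = (if b then '-' else a) := by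
  cases b
  · simpa [pvDashIf] using PySem.List.pyGetD_neg_one_append_singleton pre a ' '
  · exact PySem.List.pyGetD_neg_one_append_singleton (pre ++ [a]) '-' ' '

lemma pvALoop (f : Char → Bool) :
    ∀ (m : List Char) (a : Char) (pre : List Char),
      a ≠ '-' → (∀ c ∈ m, c ≠ '-') →
      m.foldl (pvStep f) (pre ++ [a] ++ pvDashIf (f a))
        = pre ++ [a] ++ pvPflat f a m ++ pvDashIf (f (m.getLastD a)) := by
  intro m
  induction m with
  | nil => intro a pre _ _; simp [pvPflat]
  | cons b t ih =>
    intro a pre ha hm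
    have hb : b ≠ '-' := hm b (by simp)
    have ht : ∀ c ∈ t, c ≠ '-' := fun c hc => hm c (by simp [hc])
    rw [List.foldl_cons]
    have hstep : pvStep f (pre ++ [a] ++ pvDashIf (f a)) b
        = (pre ++ [a] ++ (if f a || f b then ['-'] else [])) ++ [b] ++ pvDashIf (f b) := by
      unfold pvStep
      rw [pvGetDash]
      cases hfa : f a <;> cases hfb : f b <;> simp [pvDashIf, hfb, ha]
    rw [hstep, ih b (pre ++ [a] ++ (if f a || f b then ['-'] else [])) hb ht]
    simp only [pvPflat, List.getLastD_cons]
    simp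

lemma pvAMain (f : Char → Bool) (c0 L : Char) (mid : List Char)
    (hc0 : c0 ≠ '-') (hm : ∀ c ∈ mid, c ≠ '-') :
    (let dash1 := mid.foldl (pvStep f) (if f c0 then [c0, '-'] else [c0])
     if f L && (PySem.List.pyGetD dash1 (-1) ' ' != '-') then dash1 ++ ['-', L]
     else dash1 ++ [L])
      = c0 :: pvPflat f c0 (mid ++ [L]) := by
  have h0 : (if f c0 then [c0, '-'] else [c0]) = [] ++ [c0] ++ pvDashIf (f c0) := by
    cases hc : f c0 <;> simp [pvDashIf]
  have ha : mid.getLastD c0 ≠ '-' := by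
    rcases List.mem_cons.mp (List.getLastD_mem_cons (l := mid) (a := c0)) with h | h
    · rw [h]; exact hc0
    · exact hm _ h
  obtain ⟨pre, hp⟩ := pvPflat_shape f mid c0
  have hx : ([] : List Char) ++ [c0] ++ pvPflat f c0 mid = pre ++ [mid.getLastD c0] := by
    simp only [List.nil_append, List.singleton_append]; exact hp
  simp only [h0, pvALoop f mid c0 [] hc0 hm, pvPflat_append f mid c0 L]
  set gl := mid.getLastD c0 with hgl
  rw [hx, pvGetDash]
  cases hfa : f gl <;> cases hfL : f L <;>
    simp [pvDashIf, hfa, hfL, ha, ← hx]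

lemma pvToDigitsCore_digits :
    ∀ (fuel n : ℕ) (ds : List Char),
      (∀ c ∈ ds, 48 ≤ c.toNat ∧ c.toNat ≤ 57) →
      ∀ c ∈ Nat.toDigitsCore 10 fuel n ds, 48 ≤ c.toNat ∧ c.toNat ≤ 57 := by
  intro fuel
  induction fuel with
  | zero => intro n ds h c hc; exact h c hc
  | succ k ih =>
    intro n ds h c hc
    have hd : 48 ≤ (Nat.digitChar (n % 10)).toNat ∧ (Nat.digitChar (n % 10)).toNat ≤ 57 := by
      have h10 : n % 10 < 10 := Nat.mod_lt _ (by norm_num)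
      interval_cases h' : n % 10 <;> decide
    have hds : ∀ c ∈ (Nat.digitChar (n % 10)) :: ds, 48 ≤ c.toNat ∧ c.toNat ≤ 57 := by
      intro c hc
      rcases List.mem_cons.mp hc with h' | h'
      · rw [h']; exact hd
      · exact h c h'
    rw [Nat.toDigitsCore] at hc
    split at hc
    · exact hds c hc
    · exact ih (n / 10) _ hds c hc

lemma pvToStr_digit (n : ℕ) : ∀ c ∈ (PySem.Int.toStr ((n : Int))).toList, c ≠ '-' := by
  intro c hc
  rw [PySem.Int.toList_toStr] at hc
  simp only [PySem.Int.toChars] at hc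
  rw [if_neg (by omega)] at hc
  rw [Int.toNat_natCast] at hc
  have := pvToDigitsCore_digits (n + 1) n [] (by simp) c (by simpa [Nat.toDigits] using hc)
  intro h
  rw [h] at this
  exact absurd this (by decide)

lemma pvSliceMid (c0 L : Char) (mid : List Char) :
    PySem.List.slice (c0 :: (mid ++ [L])) (some 1) (some (-1)) = mid := by
  simp only [PySem.List.slice, PySem.List.clampIdx]
  norm_num
  rw [if_neg (by omega : ¬((mid.length : Int) + 1 < 0))]
  rw [show mid.length + 1 - 1 = mid.length from by omega]
  exact List.take_left' rfl

-- ===== VERDICT (by name: the statement is the Claim_ definition above) =====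
theorem dashatize_spec : Claim_equal_dashatize := by
  intro num _dom
  unfold Spec_dashatize
  match num with
  | none => rfl
  | some v =>
    by_cases hv : v = 0
    · subst hv; decide
    · simp only [dashatize, dashatize_alt, if_neg hv]
      have hdig : ∀ c ∈ (PySem.Int.toStr ((v.natAbs : Int))).toList, c ≠ '-' :=
        pvToStr_digit v.natAbs
      cases hs : (PySem.Int.toStr ((v.natAbs : Int))).toList with
      | nil => simp
      | cons c0 rest =>
        rw [hs] at hdig
        have hc0 : c0 ≠ '-' := hdig c0 (by simp)
        rcases List.eq_nil_or_concat rest with hr | ⟨mid, L, hr⟩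
        · subst hr; simp [PySem.List.slice_from_one]
        · subst hr
          simp only [List.concat_eq_append] at *
          have hm : ∀ c ∈ mid, c ≠ '-' := fun c hc => hdig c (by simp [hc])
          -- B side
          rw [PySem.List.slice_from_one]
          simp only [List.tail_cons]
          rw [pvZipFlat pvOdd (mid ++ [L]) c0]
          -- A side
          have hlen : (c0 :: (mid ++ [L])).length > 1 := by simp
          rw [if_pos hlen, pvSliceMid c0 L mid]
          have hget0 : PySem.List.pyGetD (c0 :: (mid ++ [L])) 0 ' ' = c0 :=
            PySem.List.pyGetD_zero_cons _ _ _
          have hgetL : PySem.List.pyGetD (c0 :: (mid ++ [L])) (-1) ' ' = L := by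
        
            rw [show c0 :: (mid ++ [L]) = (c0 :: mid) ++ [L] by simp]
            exact PySem.List.pyGetD_neg_one_append_singleton _ _ _
          rw [hget0, hgetL]
          have hfun : (fun (dash : List Char) (i : Char) =>
              if pvOdd i && pvNz i then
                if PySem.List.pyGetD dash (-1) ' ' != '-' then dash ++ ['-', i, '-']
                else dash ++ [i, '-']
              else dash ++ [i]) = pvStep pvOdd := by
            funext dash i
            rw [pvCollapse2 i]
            rfl
          rw [hfun, pvCollapse L]
          have := pvAMain pvOdd c0 L mid hc0 hm
          simp only at this
          rw [this]
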